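-- pv_equiv track=rewrite | github.com/RomanDataLab/australia_animalmigration | scripts/species_classification.py | get_species_group
-- ===== SOURCE A (Python) =====
-- SPECIES_GROUPS = {
--     # Mammals (10 species)
--     'Macropus giganteus': 'mammals',
--     'Phascolarctos cinereus': 'mammals',
--     'Tachyglossus aculeatus': 'mammals',
--     'Macropus rufus': 'mammals',
--     'Vombatus ursinus': 'mammals',
--     'Trichosurus vulpecula': 'mammals',
--     'Isoodon obesulus': 'mammals',
--     'Perameles nasuta': 'mammals',
--     'Wallabia bicolor': 'mammals',
--     'Pseudocheirus peregrinus': 'mammals',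
--
--     # Birds (10 species)
--     'Dromaius novaehollandiae': 'birds',
--     'Cacatua galerita': 'birds',
--     'Gymnorhina tibicen': 'birds',
--     'Platycercus eximius': 'birds',
--     'Corvus coronoides': 'birds',
--     'Acanthiza pusilla': 'birds',
--     'Meliphaga lewinii': 'birds',
--     'Pardalotus punctatus': 'birds',
--     'Rhipidura leucophrys': 'birds',
--     'Eolophus roseicapilla': 'birds',
--
--     # Amphibians (10 species)
--     'Litoria caerulea': 'amphibians',
--     'Limnodynastes dumerilii': 'amphibians',
--     'Crinia signifera': 'amphibians',
--     'Litoria peronii': 'amphibians',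
--     'Limnodynastes tasmaniensis': 'amphibians',
--     'Litoria ewingii': 'amphibians',
--     'Uperoleia laevigata': 'amphibians',
--     'Litoria raniformis': 'amphibians',
--     'Pseudophryne bibronii': 'amphibians',
--     'Litoria verreauxii': 'amphibians',
-- }
--
-- def get_species_group(species_name):
--     """
--     Get the group (mammals, birds, amphibians) for a species.
--
--     Parameters:
--     -----------
--     species_name : str
--         Scientific name of the species
--
--     Returns:
--     --------
--     str or None
--         Group name ('mammals', 'birds', 'amphibians') or None if not found
--     """
--     # Try exact match first
--     if species_name in SPECIES_GROUPS:
--         return SPECIES_GROUPS[species_name]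
--
--     # Try with underscores replaced by spaces
--     species_normalized = species_name.replace('_', ' ')
--     if species_normalized in SPECIES_GROUPS:
--         return SPECIES_GROUPS[species_normalized]
--
--     # Try case-insensitive match
--     for key, value in SPECIES_GROUPS.items():
--         if key.lower() == species_name.lower() or key.lower() == species_normalized.lower():
--             return value
--
--     return None
-- ===== SOURCE B (Python) =====
-- # Three lowercase-keyed membership sets, one per group, built once; classification
-- # becomes one normalization plus up-to-three set membership tests.
-- MAMMALS = {
--     'macropus giganteus', 'phascolarctos cinereus', 'tachyglossus aculeatus',
--     'macropus rufus', 'vombatus ursinus', 'trichosurus vulpecula',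
--     'isoodon obesulus', 'perameles nasuta', 'wallabia bicolor',
--     'pseudocheirus peregrinus',
-- }
-- BIRDS = {
--     'dromaius novaehollandiae', 'cacatua galerita', 'gymnorhina tibicen',
--     'platycercus eximius', 'corvus coronoides', 'acanthiza pusilla',
--     'meliphaga lewinii', 'pardalotus punctatus', 'rhipidura leucophrys',
--     'eolophus roseicapilla',
-- }
-- AMPHIBIANS = {
--     'litoria caerulea', 'limnodynastes dumerilii', 'crinia signifera',
--     'litoria peronii', 'limnodynastes tasmaniensis', 'litoria ewingii',
--     'uperoleia laevigata', 'litoria raniformis', 'pseudophryne bibronii',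
--     'litoria verreauxii',
-- }
--
--
-- def get_species_group(species_name):
--     """Map a species name to its group via one normalization and set membership."""
--     key = species_name.replace('_', ' ').lower()
--     if key in MAMMALS:
--         return 'mammals'
--     if key in BIRDS:
--         return 'birds'
--     if key in AMPHIBIANS:
--         return 'amphibians'
--     return None
-- ===== Notes on version B (the rewrite author's own statement) =====
-- stated objective: simpler
-- what changed: Replaces A's three staged lookups over one dict (exact match, underscore-normalized match, then a case-insensitive scan that re-lowers every key per call) with three precomputed lowercase membership sets, one per group: the input is normalized once (replace underscores, lower) and classified by set membership; correct because the keys are unique when lowercased.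
import Mathlib
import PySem

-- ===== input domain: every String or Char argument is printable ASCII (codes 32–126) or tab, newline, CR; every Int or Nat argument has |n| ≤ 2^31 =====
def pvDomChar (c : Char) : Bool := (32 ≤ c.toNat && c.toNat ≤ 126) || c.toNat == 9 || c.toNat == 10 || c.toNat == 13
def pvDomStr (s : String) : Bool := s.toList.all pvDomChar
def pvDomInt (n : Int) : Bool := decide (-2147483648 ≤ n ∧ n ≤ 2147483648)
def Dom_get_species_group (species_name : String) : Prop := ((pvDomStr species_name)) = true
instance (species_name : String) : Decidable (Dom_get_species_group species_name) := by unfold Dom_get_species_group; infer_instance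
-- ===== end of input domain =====

-- B replaces A's three staged lookups over one dict (exact, underscore-normalized,
-- case-insensitive scan) with three precomputed lowercase membership sets, one per
-- group: normalize once, then classify by set membership (objective: simpler).

-- ===== PORT A =====
-- module constant SPECIES_GROUPS (an association list, insertion order)
def speciesGroups : List (String × String) :=
  [("Macropus giganteus", "mammals"), ("Phascolarctos cinereus", "mammals"),
   ("Tachyglossus aculeatus", "mammals"), ("Macropus rufus", "mammals"),
   ("Vombatus ursinus", "mammals"), ("Trichosurus vulpecula", "mammals"),
   ("Isoodon obesulus", "mammals"), ("Perameles nasuta", "mammals"),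
   ("Wallabia bicolor", "mammals"), ("Pseudocheirus peregrinus", "mammals"),
   ("Dromaius novaehollandiae", "birds"), ("Cacatua galerita", "birds"),
   ("Gymnorhina tibicen", "birds"), ("Platycercus eximius", "birds"),
   ("Corvus coronoides", "birds"), ("Acanthiza pusilla", "birds"),
   ("Meliphaga lewinii", "birds"), ("Pardalotus punctatus", "birds"),
   ("Rhipidura leucophrys", "birds"), ("Eolophus roseicapilla", "birds"),
   ("Litoria caerulea", "amphibians"), ("Limnodynastes dumerilii", "amphibians"),
   ("Crinia signifera", "amphibians"), ("Litoria peronii", "amphibians"),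
   ("Limnodynastes tasmaniensis", "amphibians"), ("Litoria ewingii", "amphibians"),
   ("Uperoleia laevigata", "amphibians"), ("Litoria raniformis", "amphibians"),
   ("Pseudophryne bibronii", "amphibians"), ("Litoria verreauxii", "amphibians")]

-- A's third stage: 'for key, value in SPECIES_GROUPS.items(): if key.lower() == name.lower() or key.lower() == normalized.lower(): return value'
def loopA : List (String × String) → String → String → Option String
  | [], _, _ => none
  | (k, v) :: rest, n, nn =>
    if PySem.Str.lower k == PySem.Str.lower n || PySem.Str.lower k == PySem.Str.lower nn
    then some v else loopA rest n nn

def get_species_group (species_name : String) : Option String :=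
  match speciesGroups.lookup species_name with
  | some v => some v
  | none =>
    let species_normalized := PySem.Str.replace species_name "_" " "
    match speciesGroups.lookup species_normalized with
    | some v => some v
    | none => loopA speciesGroups species_name species_normalized

-- ===== PORT B =====
-- three module-level lowercase membership sets, one per group
def mammalsSet : PySem.Set String := PySem.Set.ofList
  ["macropus giganteus", "phascolarctos cinereus", "tachyglossus aculeatus",
   "macropus rufus", "vombatus ursinus", "trichosurus vulpecula",
   "isoodon obesulus", "perameles nasuta", "wallabia bicolor",
   "pseudocheirus peregrinus"]

def birdsSet : PySem.Set String := PySem.Set.ofList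
  ["dromaius novaehollandiae", "cacatua galerita", "gymnorhina tibicen",
   "platycercus eximius", "corvus coronoides", "acanthiza pusilla",
   "meliphaga lewinii", "pardalotus punctatus", "rhipidura leucophrys",
   "eolophus roseicapilla"]

def amphibiansSet : PySem.Set String := PySem.Set.ofList
  ["litoria caerulea", "limnodynastes dumerilii", "crinia signifera",
   "litoria peronii", "limnodynastes tasmaniensis", "litoria ewingii",
   "uperoleia laevigata", "litoria raniformis", "pseudophryne bibronii",
   "litoria verreauxii"]

def get_species_group_alt (species_name : String) : Option String :=
  let key := PySem.Str.lower (PySem.Str.replace species_name "_" " ")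
  if PySem.Set.contains mammalsSet key then some "mammals"
  else if PySem.Set.contains birdsSet key then some "birds"
  else if PySem.Set.contains amphibiansSet key then some "amphibians"
  else none

-- ===== PRECONDITION & SPEC =====
def Spec_get_species_group (species_name : String) (out : Option String) : Prop := out = get_species_group_alt species_name
instance (species_name : String) (out : Option String) : Decidable (Spec_get_species_group species_name out) := by unfold Spec_get_species_group; infer_instance

-- ===== CLAIM (what is proved, stated in full; the proofs are below) =====
def Claim_equal_get_species_group : Prop := ∀ (species_name : String), Dom_get_species_group species_name → Spec_get_species_group species_name (get_species_group species_name)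

-- ===== LEMMAS AND PROOFS =====

-- proof-side index: SPECIES_GROUPS with its keys lowered
def lowerIndex : List (String × String) :=
  speciesGroups.map (fun kv => (PySem.Str.lower kv.1, kv.2))

-- Python's str.lower maps a char to '_' only if it already was '_' (lower only moves A–Z).
theorem lowerChar_eq_underscore {c : Char} :
    PySem.Chars.lowerChar c = '_' ↔ c = '_' := by
  constructor
  · intro h
    unfold PySem.Chars.lowerChar at h
    split_ifs at h with hu
    · exfalso
      simp only [PySem.Chars.isupper, Bool.and_eq_true, decide_eq_true_eq, Char.le_def] at hu
      obtain ⟨h1, h2⟩ := hu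
      have hc : c.toNat = c.val.toNat := rfl
      have l1 : 65 ≤ c.toNat := by
        have := (UInt32.le_iff_toNat_le).mp h1
        have hA : ('A' : Char).val.toNat = 65 := by decide
        omega
      have l2 : c.toNat ≤ 90 := by
        have := (UInt32.le_iff_toNat_le).mp h2
        have hZ : ('Z' : Char).val.toNat = 90 := by decide
        omega
      have hv : (c.toNat + 32).isValidChar := Or.inl (by omega)
      have := congrArg Char.toNat h
      rw [Char.toNat_ofNat, if_pos hv] at this
      have h95 : ('_' : Char).toNat = 95 := by decide
      omega
    · exact h
  · intro h; subst h; decide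

theorem mem_underscore_lower {cs : List Char} :
    '_' ∈ PySem.Chars.lower cs ↔ '_' ∈ cs := by
  simp only [PySem.Chars.lower, List.mem_map]
  constructor
  · rintro ⟨c, hc, h⟩
    rwa [lowerChar_eq_underscore.mp h] at hc
  · intro h; exact ⟨'_', h, by decide⟩

theorem go_nomem : ∀ (fuel : Nat) (l acc : List Char), '_' ∉ l →
    PySem.Chars.replace.go ['_'] [' '] fuel l acc = acc.reverse ++ l := by
  intro fuel
  induction fuel with
  | zero => intro l acc _; rw [PySem.Chars.replace.go]
  | succ n ih =>
    intro l acc h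
    cases l with
    | nil => rw [PySem.Chars.replace.go]; simp; omega
    | cons c t =>
      rw [PySem.Chars.replace.go]
      have hc : c ≠ '_' := fun he => h (he ▸ List.mem_cons_self ..)
      have hp : List.isPrefixOf ['_'] (c :: t) = false := by
        simp [List.isPrefixOf]
        intro hh; exact absurd hh.symm hc
      rw [hp]
      simp only [Bool.false_eq_true, if_false]
      rw [ih t (c :: acc) (fun ht => h (List.mem_cons_of_mem _ ht))]
      simp

-- s.replace('_', ' ') is the identity on strings without '_'
theorem replace_id {s : String} (h : '_' ∉ s.toList) :
    PySem.Str.replace s "_" " " = s := by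
  unfold PySem.Str.replace
  rw [show ("_" : String).toList = ['_'] from rfl, show (" " : String).toList = [' '] from rfl]
  unfold PySem.Chars.replace
  simp only [List.isEmpty_cons, Bool.false_eq_true, if_false]
  rw [go_nomem _ _ _ h]
  simp [String.ofList_toList]

-- against a key whose lowering has no '_', matching name.lower() is subsumed by matching normalized.lower()
theorem cond_eq (k name : String) (hk : '_' ∉ (PySem.Str.lower k).toList) :
    (PySem.Str.lower k == PySem.Str.lower name
      || PySem.Str.lower k == PySem.Str.lower (PySem.Str.replace name "_" " "))
    = (PySem.Str.lower k == PySem.Str.lower (PySem.Str.replace name "_" " ")) := by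
  by_cases h : PySem.Str.lower k = PySem.Str.lower name
  · have hn : '_' ∉ name.toList := by
      intro hm
      apply hk
      rw [h]
      simp only [PySem.Str.lower, String.toList_ofList]
      exact mem_underscore_lower.mpr hm
    rw [replace_id hn, h]
    simp
  · have : (PySem.Str.lower k == PySem.Str.lower name) = false := by
      simp [h]
    rw [this, Bool.false_or]

theorem loopA_eq (name : String) (l : List (String × String))
    (hk : ∀ p ∈ l, '_' ∉ (PySem.Str.lower p.1).toList) :
    loopA l name (PySem.Str.replace name "_" " ")
      = (l.map (fun kv => (PySem.Str.lower kv.1, kv.2))).lookup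
          (PySem.Str.lower (PySem.Str.replace name "_" " ")) := by
  induction l with
  | nil => rfl
  | cons p t ih =>
    obtain ⟨k, v⟩ := p
    simp only [loopA, List.map_cons, List.lookup_cons]
    rw [cond_eq k name (hk (k, v) (List.mem_cons_self ..))]
    cases hbe : (PySem.Str.lower (PySem.Str.replace name "_" " ") == PySem.Str.lower k) with
    | true =>
      have h2 : (PySem.Str.lower k == PySem.Str.lower (PySem.Str.replace name "_" " "))
          = true := beq_iff_eq.mpr (eq_of_beq hbe).symm
      simp [h2]
    | false =>
      have h2 : (PySem.Str.lower k == PySem.Str.lower (PySem.Str.replace name "_" " "))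
          = false := beq_eq_false_iff_ne.mpr
        (fun e => (beq_eq_false_iff_ne.mp hbe) e.symm)
      simp only [h2, Bool.false_eq_true, if_false]
      exact ih (fun q hq => hk q (List.mem_cons_of_mem _ hq))

theorem mem_of_lookup {α β : Type} [BEq α] [LawfulBEq α] :
    ∀ (l : List (α × β)) (x : α) (v : β), l.lookup x = some v → x ∈ l.map Prod.fst := by
  intro l
  induction l with
  | nil => intro x v h; simp [List.lookup] at h
  | cons p t ih =>
    intro x v h
    rw [List.lookup_cons] at h
    cases hbe : (x == p.1) with
    | true => simp [eq_of_beq hbe]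
    | false =>
      rw [hbe] at h
      exact List.mem_cons_of_mem _ (ih x v h)

theorem lookup_map_lower :
    ∀ (l : List (String × String)),
      (l.map (fun kv => PySem.Str.lower kv.1)).Nodup →
      ∀ (x : String) (v : String), l.lookup x = some v →
      (l.map (fun kv => (PySem.Str.lower kv.1, kv.2))).lookup (PySem.Str.lower x) = some v := by
  intro l
  induction l with
  | nil => intro _ x v h; simp [List.lookup] at h
  | cons p t ih =>
    intro hnd x v h
    obtain ⟨k, w⟩ := p
    rw [List.lookup_cons] at h
    simp only [List.map_cons, List.lookup_cons]
    rw [List.map_cons, List.nodup_cons] at hnd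
    cases hbe : (x == k) with
    | true =>
      rw [hbe] at h
      rw [eq_of_beq hbe]
      simp [h]
    | false =>
      rw [hbe] at h
      have hx : x ∈ t.map Prod.fst := mem_of_lookup t x v h
      have hlx : PySem.Str.lower x ∈ t.map (fun kv => PySem.Str.lower kv.1) := by
        simp only [List.mem_map] at hx ⊢
        obtain ⟨q, hq, hqx⟩ := hx
        exact ⟨q, hq, by rw [hqx]⟩
      have hne : (PySem.Str.lower x == PySem.Str.lower k) = false := by
        simp only [beq_eq_false_iff_ne, ne_eq]
        intro hkx
        exact hnd.1 (hkx ▸ hlx)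
      rw [hne]
      exact ih hnd.2 x v h

theorem keys_no_underscore : ∀ p ∈ speciesGroups,
    '_' ∉ (PySem.Str.lower p.1).toList ∧ '_' ∉ p.1.toList := by decide

theorem lowered_keys_nodup :
    (speciesGroups.map (fun kv => PySem.Str.lower kv.1)).Nodup := by decide

-- A computes the lowered-key lookup of the normalized, lowered input
theorem a_eq_lookup (name : String) :
    get_species_group name
      = lowerIndex.lookup (PySem.Str.lower (PySem.Str.replace name "_" " ")) := by
  unfold get_species_group lowerIndex
  cases h1 : speciesGroups.lookup name with
  | some v =>
    simp only []
    have hmem : name ∈ speciesGroups.map Prod.fst := mem_of_lookup _ _ _ h1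
    have hnu : '_' ∉ name.toList := by
      simp only [List.mem_map] at hmem
      obtain ⟨p, hp, hpe⟩ := hmem
      exact hpe ▸ (keys_no_underscore p hp).2
    rw [replace_id hnu]
    exact (lookup_map_lower speciesGroups lowered_keys_nodup name v h1).symm
  | none =>
    simp only []
    cases h2 : speciesGroups.lookup (PySem.Str.replace name "_" " ") with
    | some v =>
      exact (lookup_map_lower speciesGroups lowered_keys_nodup _ v h2).symm
    | none =>
      exact loopA_eq name speciesGroups (fun p hp => (keys_no_underscore p hp).1)

-- lookup in a constant-valued block is a membership test
theorem lookup_const (v : String) :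
    ∀ (ks : List String) (key : String),
      (ks.map (fun k => (k, v))).lookup key = if ks.contains key then some v else none := by
  intro ks
  induction ks with
  | nil => intro key; simp
  | cons k t ih =>
    intro key
    simp only [List.map_cons, List.lookup_cons, List.contains_cons]
    cases hbe : (key == k) with
    | true => simp
    | false => simp [ih key]

theorem lookup_append_or {α β : Type} [BEq α] :
    ∀ (l1 l2 : List (α × β)) (x : α),
      (l1 ++ l2).lookup x = ((l1.lookup x).or (l2.lookup x)) := by
  intro l1 l2 x
  induction l1 with
  | nil => simp [List.lookup]
  | cons p t ih =>
    obtain ⟨k, v⟩ := p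
    simp only [List.cons_append, List.lookup_cons]
    cases hbe : (x == k) with
    | true => simp
    | false => simpa using ih

-- lowerIndex decomposes into the three constant-valued blocks of B's sets
theorem lowerIndex_blocks :
    lowerIndex = mammalsSet.map (fun k => (k, "mammals"))
      ++ birdsSet.map (fun k => (k, "birds"))
      ++ amphibiansSet.map (fun k => (k, "amphibians")) := by decide

-- the lowered-key lookup is exactly B's three membership tests
theorem lookup_eq_classify (key : String) :
    lowerIndex.lookup key
      = (if PySem.Set.contains mammalsSet key then some "mammals"
         else if PySem.Set.contains birdsSet key then some "birds"
         else if PySem.Set.contains amphibiansSet key then some "amphibians"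
         else none) := by
  rw [lowerIndex_blocks, lookup_append_or, lookup_append_or,
      lookup_const, lookup_const, lookup_const]
  simp only [PySem.Set.contains]
  split_ifs <;> simp_all

-- ===== VERDICT (by name: the statement is the Claim_ definition above) =====
theorem get_species_group_spec : Claim_equal_get_species_group := by
  intro name _
  unfold Spec_get_species_group get_species_group_alt
  rw [a_eq_lookup, lookup_eq_classify]
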